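-- pv_equiv track=rewrite | github.com/DelfinSR/Ascon-TFG | analisis/util.py | get_results_of_AFN
-- ===== SOURCE A (Python) =====
-- def get_results_of_AFN(AFN_func):
--     res = []
--     for x_i in range(32):
--         x_bits = [int(x) for x in '{0:05b}'.format(x_i)]
--
--         xor_result = 0
--         xu = []
--         for f in AFN_func:
--             if f == [0,0,0,0,0]:
--                 xor_result = 1
--                 continue
--             xu.append(calculate_power_u(x_bits, f))
--
--         result = 0
--         for _,x in enumerate(xu):
--             r = 1
--             for y in x:
--                 r &= y
--             result ^= r
--
--         res.append(result ^ xor_result)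
--     return res
--
-- def calculate_power_u(i_bits, bits):
--     res = []
--     for index, x in enumerate(bits):
--         if x:
--             res.append(i_bits[index])
--
--     if res == []:
--         return [0]
--     return res
-- ===== SOURCE B (Python) =====
-- # Bit-parallel: build the whole 32-entry truth table as one 32-bit integer by
-- # XOR-ing per-term tables (AND of fixed variable patterns), then unpack its bits.
-- def get_results_of_AFN(AFN_func):
--     PATTERNS = (0xFFFF0000, 0xFF00FF00, 0xF0F0F0F0, 0xCCCCCCCC, 0xAAAAAAAA)
--     table = 0
--     seen_const = False
--     for f in AFN_func:
--         if f == [0, 0, 0, 0, 0]: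
--             seen_const = True
--         else:
--             t = 0xFFFFFFFF
--             selected = False
--             for p, v in zip(PATTERNS, f):
--                 if v:
--                     t &= p
--                     selected = True
--             if selected:
--                 table ^= t
--     if seen_const:
--         table ^= 0xFFFFFFFF
--     res = []
--     for x in range(32):
--         res.append((table >> x) & 1)
--     return res
-- ===== Notes on version B (the rewrite author's own statement) =====
-- stated objective: alternative
-- what changed: B never evaluates inputs one by one: it synthesizes the whole 32-entry truth table as a single 32-bit integer by AND-ing fixed per-variable bit patterns for each term and XOR-ing the per-term tables together, then unpacks the 32 bits, whereas A loops over the 32 inputs and re-evaluates every term per input.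
import Mathlib
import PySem

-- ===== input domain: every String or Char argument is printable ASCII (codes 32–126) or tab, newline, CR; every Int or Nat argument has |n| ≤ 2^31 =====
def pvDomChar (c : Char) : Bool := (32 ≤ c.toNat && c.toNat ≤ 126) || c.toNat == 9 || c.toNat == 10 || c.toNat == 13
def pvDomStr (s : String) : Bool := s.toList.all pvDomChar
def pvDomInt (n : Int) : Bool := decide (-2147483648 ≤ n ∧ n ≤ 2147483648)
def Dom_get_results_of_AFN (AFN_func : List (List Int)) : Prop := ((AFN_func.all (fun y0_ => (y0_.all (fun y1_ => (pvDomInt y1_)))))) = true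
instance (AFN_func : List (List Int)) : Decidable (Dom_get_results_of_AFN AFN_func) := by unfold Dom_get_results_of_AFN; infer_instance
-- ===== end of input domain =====

-- B builds the whole 32-entry truth table as ONE 32-bit integer (AND of fixed per-variable bit
-- patterns per term, XOR of the per-term tables) and then unpacks its bits, instead of A's loop
-- that re-evaluates every term for each of the 32 inputs (objective: alternative algorithm).

-- ===== PORT A =====
-- '{0:05b}'.format(x_i) then [int(x) for x in …]: exact for the values range(32) supplies
-- (nonnegative, ≤ 5 binary digits; each digit char c has int(c) = c.toNat - 48).
def pvXBits (x_i : Int) : List Int :=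
  let ds := PySem.Int.toBinChars x_i
  (List.replicate (5 - ds.length) '0' ++ ds).map (fun c => (c.toNat : Int) - 48)

-- i_bits[index] ported with pyGetD 0: exact under Pre_ (every truthy index is < 5 = len i_bits).
def calculate_power_u (i_bits : List Int) (bits : List Int) : List Int :=
  let res := (PySem.List.enumerate bits).foldl
    (fun res p => if p.2 ≠ 0 then res ++ [PySem.List.pyGetD i_bits p.1 0] else res) []
  if res = [] then [0] else res

def get_results_of_AFN (AFN_func : List (List Int)) : List Int :=
  (PySem.List.pyRange 0 32 1).foldl (fun res x_i =>
    let x_bits := pvXBits x_i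
    let st := AFN_func.foldl (fun (st : Int × List (List Int)) f =>
      if f = [0, 0, 0, 0, 0] then (1, st.2)
      else (st.1, st.2 ++ [calculate_power_u x_bits f])) ((0 : Int), ([] : List (List Int)))
    let result := (PySem.List.enumerate st.2).foldl
      (fun result p => PySem.Int.bxor result (p.2.foldl (fun r y => PySem.Int.band r y) 1)) (0 : Int)
    res ++ [PySem.Int.bxor result st.1]) []

-- ===== PORT B =====
def get_results_of_AFN_alt (AFN_func : List (List Int)) : List Int :=
  let patterns : List Int := [0xFFFF0000, 0xFF00FF00, 0xF0F0F0F0, 0xCCCCCCCC, 0xAAAAAAAA]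
  let st := AFN_func.foldl (fun (st : Int × Bool) f =>
    if f = [0, 0, 0, 0, 0] then (st.1, true)
    else
      let ts := (patterns.zip f).foldl
        (fun (ts : Int × Bool) pv => if pv.2 ≠ 0 then (PySem.Int.band ts.1 pv.1, true) else ts)
        ((0xFFFFFFFF : Int), false)
      if ts.2 then (PySem.Int.bxor st.1 ts.1, st.2) else st) ((0 : Int), false)
  let table := if st.2 then PySem.Int.bxor st.1 0xFFFFFFFF else st.1
  (PySem.List.pyRange 0 32 1).foldl
    (fun res x => res ++ [PySem.Int.band (table >>> x.toNat) 1]) []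

-- ===== PRECONDITION & SPEC =====
-- Pre_ excludes exactly the inputs on which A raises IndexError: a term with a nonzero
-- (truthy) entry at index ≥ 5 makes A read i_bits[index] out of range.
def Pre_get_results_of_AFN (AFN_func : List (List Int)) : Prop :=
  ∀ f ∈ AFN_func, ∀ v ∈ f.drop 5, v = 0
instance (AFN_func : List (List Int)) : Decidable (Pre_get_results_of_AFN AFN_func) := by unfold Pre_get_results_of_AFN; infer_instance
def pvWitness_get_results_of_AFN : List (List Int) := [[1, 0, 0, 0, 0], [0, 1, 1, 0, 0], [0, 0, 0, 0, 0]]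

def Spec_get_results_of_AFN (AFN_func : List (List Int)) (out : List Int) : Prop := out = get_results_of_AFN_alt AFN_func
instance (AFN_func : List (List Int)) (out : List Int) : Decidable (Spec_get_results_of_AFN AFN_func out) := by unfold Spec_get_results_of_AFN; infer_instance

-- ===== CLAIM (what is proved, stated in full; the proofs are below) =====
def Claim_equal_get_results_of_AFN : Prop := ∀ (AFN_func : List (List Int)), Dom_get_results_of_AFN AFN_func → Pre_get_results_of_AFN AFN_func → Spec_get_results_of_AFN AFN_func (get_results_of_AFN AFN_func)

-- ===== LEMMAS AND PROOFS =====

-- the five selection booleans of a term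
def pvB (f : List Int) (i : Nat) : Bool := decide (f.getD i 0 ≠ 0)

-- AND of the selected fixed patterns, starting from all-ones (B's inner fold, as a Nat)
def pvTermT (pa pb pc pd pe : Bool) : Nat :=
  ((((0xFFFFFFFF &&& (if pa then 0xFFFF0000 else 0xFFFFFFFF))
      &&& (if pb then 0xFF00FF00 else 0xFFFFFFFF))
      &&& (if pc then 0xF0F0F0F0 else 0xFFFFFFFF))
      &&& (if pd then 0xCCCCCCCC else 0xFFFFFFFF))
      &&& (if pe then 0xAAAAAAAA else 0xAAAAAAAA ||| 0x55555555)

def pvTermN (pa pb pc pd pe : Bool) : Nat :=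
  if pa || pb || pc || pd || pe then pvTermT pa pb pc pd pe else 0

def pvTN (f : List Int) : Nat := pvTermN (pvB f 0) (pvB f 1) (pvB f 2) (pvB f 3) (pvB f 4)

-- A's per-term 0/1 value as a bit of the term's truth table
def pvTbit (n : Nat) (f : List Int) : Int := if (pvTN f).testBit n then 1 else 0

def pvSel (n : Nat) (pa pb pc pd pe : Bool) : List Int :=
  (if pa then [(pvXBits ↑n).getD 0 0] else []) ++ (if pb then [(pvXBits ↑n).getD 1 0] else []) ++
  (if pc then [(pvXBits ↑n).getD 2 0] else []) ++ (if pd then [(pvXBits ↑n).getD 3 0] else []) ++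
  (if pe then [(pvXBits ↑n).getD 4 0] else [])

def pvAnd (L : List Int) : Int :=
  (if L = [] then [(0 : Int)] else L).foldl (fun r y => PySem.Int.band r y) 1

-- the 32×32 concrete core fact: AND-reduce of the selected input bits = bit n of the term table
theorem pv_core : ∀ (n : Fin 32) (pa pb pc pd pe : Bool),
    pvAnd (pvSel n.val pa pb pc pd pe) =
      (if (pvTermN pa pb pc pd pe).testBit n.val then 1 else 0) := by
  decide

-- tail of a term beyond index 4 is all zeros under Pre_: the enumerate-fold ignores it
theorem pv_enum_fold_zero (i_bits : List Int) :
    ∀ (t : List Int) (s : Int) (acc : List Int), (∀ v ∈ t, v = 0) →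
      (PySem.List.enumerate t s).foldl
        (fun res p => if p.2 = 0 then res else res ++ [PySem.List.pyGetD i_bits p.1 0]) acc = acc := by
  intro t
  induction t with
  | nil => intro s acc _; rw [PySem.List.enumerate_nil]; rfl
  | cons v t ih =>
    intro s acc h
    rw [PySem.List.enumerate_cons]
    have hv : v = 0 := h v (by simp)
    simp only [List.foldl_cons, hv]
    rw [if_pos trivial]
    exact ih (s + 1) acc (fun w hw => h w (by simp [hw]))

-- selected-bits list built by calculate_power_u, as a function of the five selection booleans
theorem pv_cpu_eq (n : Nat) (f : List Int) (hf : ∀ v ∈ f.drop 5, v = 0) :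
    calculate_power_u (pvXBits ↑n) f =
      (if pvSel n (pvB f 0) (pvB f 1) (pvB f 2) (pvB f 3) (pvB f 4) = []
       then [(0 : Int)]
       else pvSel n (pvB f 0) (pvB f 1) (pvB f 2) (pvB f 3) (pvB f 4)) := by
  unfold calculate_power_u pvB
  rcases f with _ | ⟨a, _ | ⟨b, _ | ⟨c, _ | ⟨d, _ | ⟨e, rest⟩⟩⟩⟩⟩
  · simp [PySem.List.enumerate_nil, pvSel]
  · by_cases ha : a = 0 <;>
      simp [PySem.List.enumerate_cons, PySem.List.enumerate_nil, pvSel, ha,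
        PySem.List.pyGetD_ofNat', List.getD]
  · by_cases ha : a = 0 <;> by_cases hb : b = 0 <;>
      simp [PySem.List.enumerate_cons, PySem.List.enumerate_nil, pvSel, ha, hb,
        PySem.List.pyGetD_ofNat', List.getD]
  · by_cases ha : a = 0 <;> by_cases hb : b = 0 <;> by_cases hc : c = 0 <;>
      simp [PySem.List.enumerate_cons, PySem.List.enumerate_nil, pvSel, ha, hb, hc,
        PySem.List.pyGetD_ofNat', List.getD]
  · by_cases ha : a = 0 <;> by_cases hb : b = 0 <;> by_cases hc : c = 0 <;> by_cases hd : d = 0 <;>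
      simp [PySem.List.enumerate_cons, PySem.List.enumerate_nil, pvSel, ha, hb, hc, hd,
        PySem.List.pyGetD_ofNat', List.getD]
  · have hrest : ∀ v ∈ rest, v = 0 := by simpa using hf
    rw [PySem.List.enumerate_cons, PySem.List.enumerate_cons, PySem.List.enumerate_cons,
        PySem.List.enumerate_cons, PySem.List.enumerate_cons]
    norm_num
    rw [pv_enum_fold_zero (pvXBits ↑n) rest 5 _ hrest]
    by_cases ha : a = 0 <;> by_cases hb : b = 0 <;> by_cases hc : c = 0 <;> by_cases hd : d = 0 <;>
      by_cases he : e = 0 <;>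
      simp [pvSel, ha, hb, hc, hd, he, PySem.List.pyGetD_ofNat', List.getD]

-- A's per-term AND-reduce = bit n of the term table
theorem pv_term_val (n : Nat) (hn : n < 32) (f : List Int) (hf : ∀ v ∈ f.drop 5, v = 0) :
    (calculate_power_u (pvXBits ↑n) f).foldl (fun r y => PySem.Int.band r y) 1 = pvTbit n f := by
  rw [pv_cpu_eq n f hf]
  have h := pv_core ⟨n, hn⟩ (pvB f 0) (pvB f 1) (pvB f 2) (pvB f 3) (pvB f 4)
  unfold pvAnd at h
  rw [h]; rfl

-- B's zip-fold over the five patterns, as a function of the five selection booleans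
theorem pv_zip_eq (f : List Int) :
    (([0xFFFF0000, 0xFF00FF00, 0xF0F0F0F0, 0xCCCCCCCC, 0xAAAAAAAA] : List Int).zip f).foldl
      (fun (ts : Int × Bool) pv => if pv.2 ≠ 0 then (PySem.Int.band ts.1 pv.1, true) else ts)
      ((0xFFFFFFFF : Int), false)
    = ((↑(pvTermT (pvB f 0) (pvB f 1) (pvB f 2) (pvB f 3) (pvB f 4)) : Int),
        pvB f 0 || pvB f 1 || pvB f 2 || pvB f 3 || pvB f 4) := by
  unfold pvB
  rcases f with _ | ⟨a, _ | ⟨b, _ | ⟨c, _ | ⟨d, _ | ⟨e, rest⟩⟩⟩⟩⟩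
  · simp [pvTermT, List.getD]
  · by_cases ha : a = 0 <;> simp [pvTermT, ha, List.getD] <;> decide
  · by_cases ha : a = 0 <;> by_cases hb : b = 0 <;> simp [pvTermT, ha, hb, List.getD] <;> decide
  · by_cases ha : a = 0 <;> by_cases hb : b = 0 <;> by_cases hc : c = 0 <;>
      simp [pvTermT, ha, hb, hc, List.getD] <;> decide
  · by_cases ha : a = 0 <;> by_cases hb : b = 0 <;> by_cases hc : c = 0 <;> by_cases hd : d = 0 <;>
      simp [pvTermT, ha, hb, hc, hd, List.getD] <;> decide
  · by_cases ha : a = 0 <;> by_cases hb : b = 0 <;> by_cases hc : c = 0 <;> by_cases hd : d = 0 <;>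
      by_cases he : e = 0 <;> simp [pvTermT, ha, hb, hc, hd, he, List.getD] <;> decide

-- A's state fold characterised
theorem pv_stA (bits : List Int) : ∀ (l : List (List Int)) (a : Int) (acc : List (List Int)),
    l.foldl (fun (st : Int × List (List Int)) f =>
      if f = [0, 0, 0, 0, 0] then (1, st.2)
      else (st.1, st.2 ++ [calculate_power_u bits f])) (a, acc) =
    ((if [0, 0, 0, 0, 0] ∈ l then 1 else a),
     acc ++ (l.filter (fun f => f ≠ [0, 0, 0, 0, 0])).map (calculate_power_u bits)) := by
  intro l
  induction l with
  | nil => intro a acc; simp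
  | cons f l ih =>
    intro a acc
    simp only [List.foldl_cons]
    by_cases hz : f = [0, 0, 0, 0, 0]
    · subst hz; rw [if_pos rfl, ih]; simp
    · rw [if_neg hz, ih]
      have hz' : ¬([0, 0, 0, 0, 0] = f) := fun h => hz h.symm
      simp [hz, hz']

-- B's state fold characterised: the table is the Nat XOR-fold of the per-term tables
theorem pv_stB : ∀ (l : List (List Int)) (t : Nat) (c : Bool),
    l.foldl (fun (st : Int × Bool) f =>
      if f = [0, 0, 0, 0, 0] then (st.1, true)
      else
        let ts := (([0xFFFF0000, 0xFF00FF00, 0xF0F0F0F0, 0xCCCCCCCC, 0xAAAAAAAA] : List Int).zip f).foldl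
          (fun (ts : Int × Bool) pv => if pv.2 ≠ 0 then (PySem.Int.band ts.1 pv.1, true) else ts)
          ((0xFFFFFFFF : Int), false)
        if ts.2 then (PySem.Int.bxor st.1 ts.1, st.2) else st) ((↑t : Int), c) =
    ((↑((l.filter (fun f => f ≠ [0, 0, 0, 0, 0])).foldl (fun u f => u ^^^ pvTN f) t) : Int),
      c || ([0, 0, 0, 0, 0] ∈ l)) := by
  intro l
  induction l with
  | nil => intro t c; simp
  | cons f l ih =>
    intro t c
    simp only [List.foldl_cons]
    by_cases hz : f = [0, 0, 0, 0, 0]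
    · subst hz
      rw [if_pos rfl, ih]
      simp
    · rw [if_neg hz, pv_zip_eq f]
      have hz' : ¬([0, 0, 0, 0, 0] = f) := fun h => hz h.symm
      by_cases hsel : (pvB f 0 || pvB f 1 || pvB f 2 || pvB f 3 || pvB f 4) = true
      · simp only [hsel, if_pos]
        rw [PySem.Int.bxor_natCast, ih]
        have : pvTN f = pvTermT (pvB f 0) (pvB f 1) (pvB f 2) (pvB f 3) (pvB f 4) := by
          unfold pvTN pvTermN; rw [if_pos hsel]
        simp [hz, hz', this]
      · simp only [hsel, if_neg, Bool.false_eq_true, not_false_iff]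
        rw [ih]
        have : pvTN f = 0 := by
          unfold pvTN pvTermN; rw [if_neg (by simpa using hsel)]
        simp [hz, hz', this]

-- fold over enumerate ignoring the index = fold over the list
theorem pv_foldl_enumerate_snd {α β : Type} (g : β → α → β) :
    ∀ (xs : List α) (s : Int) (a : β),
      (PySem.List.enumerate xs s).foldl (fun r p => g r p.2) a = xs.foldl g a := by
  intro xs
  induction xs with
  | nil => intro s a; rw [PySem.List.enumerate_nil]; rfl
  | cons x xs ih => intro x a; rw [PySem.List.enumerate_cons]; simp only [List.foldl_cons]; exact ih _ _

-- bit extraction of a Nat as a 0/1 Nat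
theorem pv_shift_and_one (m n : Nat) : (m >>> n) &&& 1 = if m.testBit n then 1 else 0 := by
  rcases Nat.testBit m n |>.eq_false_or_eq_true with h | h <;>
    simp [h] <;> simpa [Nat.testBit, Nat.and_comm] using h

-- A's XOR loop over the per-term bits = bit n of the Nat XOR-fold of the term tables
theorem pv_xor_fold (n : Nat) : ∀ (F : List (List Int)) (t : Nat),
    F.foldl (fun r f => PySem.Int.bxor r (pvTbit n f)) (if t.testBit n then 1 else 0) =
      if (F.foldl (fun u f => u ^^^ pvTN f) t).testBit n then 1 else 0 := by
  intro F
  induction F with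
  | nil => intro t; rfl
  | cons f F ih =>
    intro t
    simp only [List.foldl_cons]
    have : PySem.Int.bxor (if t.testBit n then 1 else 0) (pvTbit n f) =
        if (t ^^^ pvTN f).testBit n then (1 : Int) else 0 := by
      unfold pvTbit
      rw [Nat.testBit_xor]
      rcases t.testBit n |>.eq_false_or_eq_true with h1 | h1 <;>
        rcases (pvTN f).testBit n |>.eq_false_or_eq_true with h2 | h2 <;>
          simp [h1, h2] <;> decide
    rw [this]
    exact ih (t ^^^ pvTN f)

-- ===== VERDICT (by name: the statement is the Claim_ definition above) =====
theorem get_results_of_AFN_spec : Claim_equal_get_results_of_AFN := by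
  intro l _ hpre
  unfold Spec_get_results_of_AFN
  simp only [get_results_of_AFN, get_results_of_AFN_alt]
  rw [PySem.List.foldl_append_singleton_eq_map, PySem.List.foldl_append_singleton_eq_map]
  simp only [List.nil_append]
  rw [show ((0 : Int), false) = ((↑(0 : Nat) : Int), false) by norm_num, pv_stB]
  apply List.map_congr_left
  intro x hx
  rw [PySem.List.mem_pyRange_one] at hx
  lift x to ℕ using hx.1 with n
  have hn : n < 32 := by exact_mod_cast hx.2
  rw [pv_stA (pvXBits ↑n) l 0 []]
  simp only [List.nil_append, Bool.false_or, Int.toNat_natCast]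
  rw [pv_foldl_enumerate_snd
        (fun r (tl : List Int) => PySem.Int.bxor r (tl.foldl (fun r y => PySem.Int.band r y) 1)),
      List.foldl_map]
  rw [PySem.List.foldl_congr_mem _ _ (fun r f => PySem.Int.bxor r (pvTbit n f)) 0
        (fun r f hf => by rw [pv_term_val n hn f (hpre f (List.mem_of_mem_filter hf))])]
  set F := l.filter (fun f => f ≠ [0, 0, 0, 0, 0]) with hF
  set N := F.foldl (fun u f => u ^^^ pvTN f) 0 with hN
  have hA : F.foldl (fun r f => PySem.Int.bxor r (pvTbit n f)) 0 =
      if N.testBit n then (1 : Int) else 0 := by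
    have := pv_xor_fold n F 0
    simpa using this
  rw [hA]
  by_cases hc : [0, 0, 0, 0, 0] ∈ l
  · simp only [hc, decide_true, if_true]
    rw [show (0xFFFFFFFF : Int) = ((0xFFFFFFFF : Nat) : Int) by norm_num,
        PySem.Int.bxor_natCast]
    rw [Int.shiftRight_natCast, show (1 : Int) = ((1 : Nat) : Int) by norm_num,
        PySem.Int.band_natCast, pv_shift_and_one, Nat.testBit_xor]
    have hones : (0xFFFFFFFF : Nat).testBit n = true := by
      have h32 : (0xFFFFFFFF : Nat) = 2 ^ 32 - 1 := by norm_num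
      rw [h32, Nat.testBit_two_pow_sub_one]
      simpa using hn
    rcases N.testBit n |>.eq_false_or_eq_true with h1 | h1 <;> simp [h1, hones] <;> decide
  · simp only [hc, decide_false, Bool.false_eq_true, if_false]
    rw [Int.shiftRight_natCast, show (1 : Int) = ((1 : Nat) : Int) by norm_num,
        PySem.Int.band_natCast, pv_shift_and_one]
    rcases N.testBit n |>.eq_false_or_eq_true with h1 | h1 <;> simp [h1] <;> decide
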